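-- pv_equiv track=rewrite | github.com/jamestang7/CS61A | week2/ex.py | mystery2
-- ===== SOURCE A (Python) =====
-- def likes(n):
--     return n % 2 == 0
--
-- def mystery2(n):
--     i, j, k = 0, None, None
--     while i < n:
--         if likes(i):
--             if j != None and (k == None or i - j < k):
--                 k = i - j
--             j = i
--         i += 1
--     return k
-- ===== SOURCE B (Python) =====
-- def mystery2(n):
--     # Evens below n are 0,2,4,...; all consecutive gaps equal 2, so the
--     # minimum gap is 2 as soon as two evens exist (n >= 3), else None.
--     return 2 if n >= 3 else None
-- ===== Notes on version B (the rewrite author's own statement) =====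
-- stated objective: faster
-- what changed: Replaced the O(n) scan over all integers below n with the closed form: evens below n are 0,2,4,... with every gap 2, so return 2 iff n >= 3, else None.
import Mathlib
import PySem

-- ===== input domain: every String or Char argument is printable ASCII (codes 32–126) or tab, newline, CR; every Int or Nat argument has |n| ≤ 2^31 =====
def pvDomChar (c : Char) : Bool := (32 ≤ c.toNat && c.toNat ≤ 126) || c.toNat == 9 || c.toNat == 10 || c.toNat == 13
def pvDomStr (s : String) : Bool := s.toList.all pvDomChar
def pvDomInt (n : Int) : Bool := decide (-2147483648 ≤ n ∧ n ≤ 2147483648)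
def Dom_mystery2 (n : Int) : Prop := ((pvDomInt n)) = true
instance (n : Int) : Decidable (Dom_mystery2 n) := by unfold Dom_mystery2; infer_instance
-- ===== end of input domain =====

-- B replaces A's O(n) scan with the closed form: evens below n are 0,2,4,... with
-- every consecutive gap 2, so the minimum gap is 2 iff n >= 3, else None (faster).
-- ===== PORT A =====

-- while i < n: if likes(i): if j != None and (k == None or i-j < k): k = i-j; j = i; i += 1
def mystery2_likes (n : Int) : Bool := n % 2 == 0

def mystery2_loop (n i : Int) (j k : Option Int) : Option Int :=
  if _h : i < n then
    if mystery2_likes i then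
      mystery2_loop n (i + 1) (some i)
        (match j, k with
         | some jv, none => some (i - jv)
         | some jv, some kv => if i - jv < kv then some (i - jv) else some kv
         | none, k => k)
    else
      mystery2_loop n (i + 1) j k
  else k
termination_by (n - i).toNat
decreasing_by all_goals omega

def mystery2 (n : Int) : Option Int := mystery2_loop n 0 none none

-- ===== PORT B =====
def mystery2_alt (n : Int) : Option Int := if n ≥ 3 then some 2 else none

-- ===== PRECONDITION & SPEC =====
def Spec_mystery2 (n : Int) (out : Option Int) : Prop := out = mystery2_alt n
instance (n : Int) (out : Option Int) : Decidable (Spec_mystery2 n out) := by unfold Spec_mystery2; infer_instance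

-- ===== CLAIM (what is proved, stated in full; the proofs are below) =====
def Claim_equal_mystery2 : Prop := ∀ (n : Int), Dom_mystery2 n → Spec_mystery2 n (mystery2 n)

-- ===== LEMMAS AND PROOFS =====

-- ===== VERDICT (by name: the statement is the Claim_ definition above) =====

-- Invariant: once k = some 2 and j = some jv with jv even, jv < i, i - jv ≤ 2,
-- the loop keeps returning some 2.
theorem mystery2_loop_inv (fuel : Nat) : ∀ (n i jv : Int), (n - i).toNat = fuel →
    jv % 2 = 0 → jv < i → i - jv ≤ 2 →
    mystery2_loop n i (some jv) (some 2) = some 2 := by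
  induction fuel with
  | zero =>
    intro n i jv hf _ _ _
    rw [mystery2_loop]
    have : ¬ i < n := by omega
    simp [this]
  | succ f ih =>
    intro n i jv hf hj hlt hle
    rw [mystery2_loop]
    by_cases hin : i < n
    · have hf' : (n - (i + 1)).toNat = f := by omega
      by_cases he : i % 2 = 0
      · have : (2 : Int) ≤ i - jv := by omega
        simp only [hin, dif_pos, mystery2_likes, he, decide_true]
        have hnl : ¬ (i - jv < 2) := by omega
        simp only [hnl, if_false]
        exact ih n (i + 1) i hf' he (by omega) (by omega)
      · have hfalse : mystery2_likes i = false := by simp [mystery2_likes, he]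
        simp only [hin, dif_pos, hfalse, if_false]
        exact ih n (i + 1) jv hf' hj (by omega) (by omega)
    · rw [dif_neg hin]

theorem mystery2_small (n : Int) (h : n < 3) : mystery2 n = none := by
  unfold mystery2
  rw [mystery2_loop]
  by_cases h0 : (0 : Int) < n
  · simp only [h0, dif_pos, mystery2_likes]
    norm_num
    rw [mystery2_loop]
    by_cases h1 : (1 : Int) < n
    · simp only [h1, dif_pos, mystery2_likes]
      norm_num
      rw [mystery2_loop]
      have : ¬ (2 : Int) < n := by omega
      simp [this]
    · simp [h1]
  · simp [h0]

theorem mystery2_big (n : Int) (h : 3 ≤ n) : mystery2 n = some 2 := by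
  unfold mystery2
  rw [mystery2_loop]
  have h0 : (0 : Int) < n := by omega
  simp only [h0, dif_pos, mystery2_likes]
  norm_num
  rw [mystery2_loop]
  have h1 : (1 : Int) < n := by omega
  simp only [h1, dif_pos, mystery2_likes]
  norm_num
  rw [mystery2_loop]
  have h2 : (2 : Int) < n := by omega
  simp only [h2, dif_pos, mystery2_likes]
  norm_num
  exact mystery2_loop_inv (n - 3).toNat n 3 2 (by omega) (by omega) (by omega) (by omega)

theorem mystery2_spec : Claim_equal_mystery2 := by
  intro n _
  unfold Spec_mystery2 mystery2_alt
  by_cases h : 3 ≤ n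
  · rw [mystery2_big n h, if_pos h]
  · rw [mystery2_small n (by omega), if_neg h]
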